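-- pv_equiv track=rewrite | github.com/eli64s/readme-ai | readmeai/generators/banners/ascii.py | generate_box_banner
-- ===== SOURCE A (Python) =====
-- def generate_box_banner(title: str, tagline: str = "") -> str:
--     """Generate an ASCII banner for the project name and tagline."""
--     lines = [""] * 5
--     for char in title:
--         letter = _create_letter(char)
--         for i in range(5):
--             lines[i] += f"{letter[i]} "
--
--     max_width = max(len(line) for line in lines)
--     box_width = max(max_width, len(tagline)) + 4
--
--     banner = [
--         "╔" + "═" * box_width + "╗",
--         "║" + " " * box_width + "║",
--     ]
--     banner.extend(f"║  {line.ljust(box_width - 2)}║" for line in lines)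
--     banner.extend([
--         "║" + " " * box_width + "║",
--         # f"║  {tagline.center(box_width - 4)}  ║",
--         "║" + " " * box_width + "║",
--         "╚" + "═" * box_width + "╝",
--     ])
--     return _wrap_with_pre_tag("\n".join(banner))
--
-- def _create_letter(char) -> list[str]:
--     """Create an ASCII letter from a character."""
--     letters = {
--         "A": ["  ██  ", " ████ ", "██  ██", "██████", "██  ██"],
--         "B": ["██████", "██   █", "██████", "██   █", "██████"],
--         "C": [" ████ ", "██    ", "██    ", "██    ", " ████ "],
--         "D": ["████  ", "██  ██", "██  ██", "██  ██", "████  "],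
--         "E": ["██████", "██    ", "████  ", "██    ", "██████"],
--         "F": ["██████", "██    ", "████  ", "██    ", "██    "],
--         "G": [" ████ ", "██    ", "██ ███", "██  ██", " ████ "],
--         "H": ["██  ██", "██  ██", "██████", "██  ██", "██  ██"],
--         "I": ["██████", "  ██  ", "  ██  ", "  ██  ", "██████"],
--         "J": ["██████", "   ██ ", "   ██ ", "██ ██ ", " ███  "],
--         "K": ["██  ██", "██ ██ ", "████  ", "██ ██ ", "██  ██"],
--         "L": ["██    ", "██    ", "██    ", "██    ", "██████"],
--         "M": ["██   ██", "███ ███", "██ █ ██", "██   ██", "██   ██"],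
--         "N": ["██   ██", "███  ██", "██ █ ██", "██  ███", "██   ██"],
--         "O": [" ████ ", "██  ██", "██  ██", "██  ██", " ████ "],
--         "P": ["██████", "██  ██", "██████", "██    ", "██    "],
--         "Q": [" ████ ", "██  ██", "██  ██", "██ ███", " ██ ██"],
--         "R": ["██████", "██  ██", "██████", "██ ██ ", "██  ██"],
--         "S": [" ████ ", "██    ", " ████ ", "    ██", "█████ "],
--         "T": ["██████", "  ██  ", "  ██  ", "  ██  ", "  ██  "],
--         "U": ["██  ██", "██  ██", "██  ██", "██  ██", " ████ "],
--         "V": ["██  ██", "██  ██", "██  ██", " ████ ", "  ██  "],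
--         "W": ["██   ██", "██   ██", "██ █ ██", "███ ███", "██   ██"],
--         "X": ["██  ██", " ████ ", "  ██  ", " ████ ", "██  ██"],
--         "Y": ["██  ██", " ████ ", "  ██  ", "  ██  ", "  ██  "],
--         "Z": ["██████", "   ██ ", "  ██  ", " ██   ", "██████"],
--         "-": ["      ", "      ", "██████", "      ", "      "],
--         ".": ["      ", "      ", "  ██  ", "  ██  ", "      "],
--         " ": ["    ", "    ", "    ", "    ", "    "],
--     }
--     return letters.get(char.upper(), ["?????"] * 5)
--
-- def _wrap_with_pre_tag(text: str) -> str: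
--     """Wrap the text content with a <pre> tag."""
--     return f"<pre>\n{text}\n</pre>"
-- ===== SOURCE B (Python) =====
-- def generate_box_banner(title: str, tagline: str = "") -> str:
--     """Generate an ASCII banner: flat glyph strings sliced per row, width by arithmetic."""
--     flats = [_glyph_flat(c) for c in title]
--     max_width = sum(w + 1 for _, w in flats)
--     box_width = max(max_width, len(tagline)) + 4
--     inner = box_width - 2
--     blank = "\u2551" + " " * box_width + "\u2551"
--     rows = ["\u2554" + "\u2550" * box_width + "\u2557", blank]
--     for i in range(5):
--         text = "".join(s[i * w:(i + 1) * w] + " " for s, w in flats)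
--         rows.append("\u2551  " + text + " " * (inner - len(text)) + "\u2551")
--     rows += [blank, blank, "\u255a" + "\u2550" * box_width + "\u255d"]
--     return "<pre>\n" + "\n".join(rows) + "\n</pre>"
--
--
-- def _glyph_flat(ch):
--     """Flat 5-row glyph string and its row width for one character."""
--     s = _FONT.get(ch.upper())
--     if s is None:
--         return "?????" * 5, 5
--     return s, len(s) // 5
--
--
-- _FONT = {
--     "A": "  ██   ████ ██  ██████████  ██",
--     "B": "████████   █████████   ███████",
--     "C": " ████ ██    ██    ██     ████ ",
--     "D": "████  ██  ████  ████  ██████  ",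
--     "E": "████████    ████  ██    ██████",
--     "F": "████████    ████  ██    ██    ",
--     "G": " ████ ██    ██ █████  ██ ████ ",
--     "H": "██  ████  ██████████  ████  ██",
--     "I": "██████  ██    ██    ██  ██████",
--     "J": "██████   ██    ██ ██ ██  ███  ",
--     "K": "██  ████ ██ ████  ██ ██ ██  ██",
--     "L": "██    ██    ██    ██    ██████",
--     "M": "██   █████ █████ █ ████   ████   ██",
--     "N": "██   █████  ████ █ ████  █████   ██",
--     "O": " ████ ██  ████  ████  ██ ████ ",
--     "P": "████████  ██████████    ██    ",
--     "Q": " ████ ██  ████  ████ ███ ██ ██",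
--     "R": "████████  ██████████ ██ ██  ██",
--     "S": " ████ ██     ████     ███████ ",
--     "T": "██████  ██    ██    ██    ██  ",
--     "U": "██  ████  ████  ████  ██ ████ ",
--     "V": "██  ████  ████  ██ ████   ██  ",
--     "W": "██   ████   ████ █ █████ █████   ██",
--     "X": "██  ██ ████   ██   ████ ██  ██",
--     "Y": "██  ██ ████   ██    ██    ██  ",
--     "Z": "██████   ██   ██   ██   ██████",
--     "-": "            ██████            ",
--     ".": "              ██    ██        ",
--     " ": "                    "
-- }
-- ===== Notes on version B (the rewrite author's own statement) =====
-- stated objective: faster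
-- what changed: B stores each glyph as one flat 5-row string and produces each banner row by slicing that flat string per character, computing the box width arithmetically as the sum of per-glyph widths plus separators instead of A's char-major accumulation into five growing strings followed by a max over their lengths.
import Mathlib
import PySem

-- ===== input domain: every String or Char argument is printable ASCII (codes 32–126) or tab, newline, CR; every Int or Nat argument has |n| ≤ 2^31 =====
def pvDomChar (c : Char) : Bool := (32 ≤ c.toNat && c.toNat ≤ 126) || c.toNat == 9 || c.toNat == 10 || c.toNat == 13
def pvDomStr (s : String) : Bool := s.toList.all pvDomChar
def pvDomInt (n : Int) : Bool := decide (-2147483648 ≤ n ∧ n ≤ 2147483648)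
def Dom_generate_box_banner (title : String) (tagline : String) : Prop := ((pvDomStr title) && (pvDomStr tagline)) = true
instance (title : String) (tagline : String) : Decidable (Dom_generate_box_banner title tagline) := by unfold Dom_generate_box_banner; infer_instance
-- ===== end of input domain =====

-- B stores each glyph as ONE flat 5-row string sliced per row and computes the box width
-- arithmetically from per-glyph widths (no max over built lines), instead of A's char-major
-- accumulation into five growing strings; objective: faster (measured).

-- ===== PORT A =====
-- A-side: _create_letter's table, keyed by the already-uppercased character
def pvGlyphTab (u : Char) : List (List Char) :=
  match u with
  | 'A' => ["  ██  ".toList, " ████ ".toList, "██  ██".toList, "██████".toList, "██  ██".toList]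
  | 'B' => ["██████".toList, "██   █".toList, "██████".toList, "██   █".toList, "██████".toList]
  | 'C' => [" ████ ".toList, "██    ".toList, "██    ".toList, "██    ".toList, " ████ ".toList]
  | 'D' => ["████  ".toList, "██  ██".toList, "██  ██".toList, "██  ██".toList, "████  ".toList]
  | 'E' => ["██████".toList, "██    ".toList, "████  ".toList, "██    ".toList, "██████".toList]
  | 'F' => ["██████".toList, "██    ".toList, "████  ".toList, "██    ".toList, "██    ".toList]
  | 'G' => [" ████ ".toList, "██    ".toList, "██ ███".toList, "██  ██".toList, " ████ ".toList]
  | 'H' => ["██  ██".toList, "██  ██".toList, "██████".toList, "██  ██".toList, "██  ██".toList]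
  | 'I' => ["██████".toList, "  ██  ".toList, "  ██  ".toList, "  ██  ".toList, "██████".toList]
  | 'J' => ["██████".toList, "   ██ ".toList, "   ██ ".toList, "██ ██ ".toList, " ███  ".toList]
  | 'K' => ["██  ██".toList, "██ ██ ".toList, "████  ".toList, "██ ██ ".toList, "██  ██".toList]
  | 'L' => ["██    ".toList, "██    ".toList, "██    ".toList, "██    ".toList, "██████".toList]
  | 'M' => ["██   ██".toList, "███ ███".toList, "██ █ ██".toList, "██   ██".toList, "██   ██".toList]
  | 'N' => ["██   ██".toList, "███  ██".toList, "██ █ ██".toList, "██  ███".toList, "██   ██".toList]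
  | 'O' => [" ████ ".toList, "██  ██".toList, "██  ██".toList, "██  ██".toList, " ████ ".toList]
  | 'P' => ["██████".toList, "██  ██".toList, "██████".toList, "██    ".toList, "██    ".toList]
  | 'Q' => [" ████ ".toList, "██  ██".toList, "██  ██".toList, "██ ███".toList, " ██ ██".toList]
  | 'R' => ["██████".toList, "██  ██".toList, "██████".toList, "██ ██ ".toList, "██  ██".toList]
  | 'S' => [" ████ ".toList, "██    ".toList, " ████ ".toList, "    ██".toList, "█████ ".toList]
  | 'T' => ["██████".toList, "  ██  ".toList, "  ██  ".toList, "  ██  ".toList, "  ██  ".toList]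
  | 'U' => ["██  ██".toList, "██  ██".toList, "██  ██".toList, "██  ██".toList, " ████ ".toList]
  | 'V' => ["██  ██".toList, "██  ██".toList, "██  ██".toList, " ████ ".toList, "  ██  ".toList]
  | 'W' => ["██   ██".toList, "██   ██".toList, "██ █ ██".toList, "███ ███".toList, "██   ██".toList]
  | 'X' => ["██  ██".toList, " ████ ".toList, "  ██  ".toList, " ████ ".toList, "██  ██".toList]
  | 'Y' => ["██  ██".toList, " ████ ".toList, "  ██  ".toList, "  ██  ".toList, "  ██  ".toList]
  | 'Z' => ["██████".toList, "   ██ ".toList, "  ██  ".toList, " ██   ".toList, "██████".toList]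
  | '-' => ["      ".toList, "      ".toList, "██████".toList, "      ".toList, "      ".toList]
  | '.' => ["      ".toList, "      ".toList, "  ██  ".toList, "  ██  ".toList, "      ".toList]
  | ' ' => ["    ".toList, "    ".toList, "    ".toList, "    ".toList, "    ".toList]
  | _ => List.replicate 5 "?????".toList

-- A's _create_letter(char) = table lookup on char.upper()
def pvGlyph (c : Char) : List (List Char) := pvGlyphTab (PySem.Chars.upperChar c)

-- str.ljust(w): pad on the right with spaces to width w (exact for these ASCII-free lists)
def pvLjust (l : List Char) (w : Nat) : List Char := l ++ List.replicate (w - l.length) ' '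

-- A-side helper: the body of A's `for char in title` loop (lines[i] += f"{letter[i]} ", i in range(5))
def pvStepA (ls : List (List Char)) (c : Char) : List (List Char) :=
  let letter := pvGlyph c
  (PySem.List.pyRange 0 5 1).foldl
    (fun ls i =>
      PySem.List.pySetD ls i
        (PySem.List.pyGetD ls i [] ++ (PySem.List.pyGetD letter i [] ++ [' ']))) ls

def generate_box_banner (title : String) (tagline : String) : String :=
  let lines := title.toList.foldl pvStepA (List.replicate 5 ([] : List Char))
  let max_width := ((lines.map (fun l => l.length)).max?).getD 0
  let box_width := Nat.max max_width tagline.toList.length + 4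
  let banner : List (List Char) :=
    ['╔' :: (List.replicate box_width '═' ++ ['╗']),
     '║' :: (List.replicate box_width ' ' ++ ['║'])]
    ++ lines.map (fun line => "║  ".toList ++ pvLjust line (box_width - 2) ++ ['║'])
    ++ ['║' :: (List.replicate box_width ' ' ++ ['║']),
        '║' :: (List.replicate box_width ' ' ++ ['║']),
        '╚' :: (List.replicate box_width '═' ++ ['╝'])]
  String.ofList ("<pre>\n".toList ++ PySem.Chars.join ['\n'] banner ++ "\n</pre>".toList)

-- ===== PORT B =====
-- B-side: _FONT — each glyph as one flat string (its 5 rows concatenated)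
def pvFont? (u : Char) : Option (List Char) :=
  match u with
  | 'A' => some "  ██   ████ ██  ██████████  ██".toList
  | 'B' => some "████████   █████████   ███████".toList
  | 'C' => some " ████ ██    ██    ██     ████ ".toList
  | 'D' => some "████  ██  ████  ████  ██████  ".toList
  | 'E' => some "████████    ████  ██    ██████".toList
  | 'F' => some "████████    ████  ██    ██    ".toList
  | 'G' => some " ████ ██    ██ █████  ██ ████ ".toList
  | 'H' => some "██  ████  ██████████  ████  ██".toList
  | 'I' => some "██████  ██    ██    ██  ██████".toList
  | 'J' => some "██████   ██    ██ ██ ██  ███  ".toList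
  | 'K' => some "██  ████ ██ ████  ██ ██ ██  ██".toList
  | 'L' => some "██    ██    ██    ██    ██████".toList
  | 'M' => some "██   █████ █████ █ ████   ████   ██".toList
  | 'N' => some "██   █████  ████ █ ████  █████   ██".toList
  | 'O' => some " ████ ██  ████  ████  ██ ████ ".toList
  | 'P' => some "████████  ██████████    ██    ".toList
  | 'Q' => some " ████ ██  ████  ████ ███ ██ ██".toList
  | 'R' => some "████████  ██████████ ██ ██  ██".toList
  | 'S' => some " ████ ██     ████     ███████ ".toList
  | 'T' => some "██████  ██    ██    ██    ██  ".toList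
  | 'U' => some "██  ████  ████  ████  ██ ████ ".toList
  | 'V' => some "██  ████  ████  ██ ████   ██  ".toList
  | 'W' => some "██   ████   ████ █ █████ █████   ██".toList
  | 'X' => some "██  ██ ████   ██   ████ ██  ██".toList
  | 'Y' => some "██  ██ ████   ██    ██    ██  ".toList
  | 'Z' => some "██████   ██   ██   ██   ██████".toList
  | '-' => some "            ██████            ".toList
  | '.' => some "              ██    ██        ".toList
  | ' ' => some "                    ".toList
  | _ => none

-- B's _glyph_flat on the uppercased character (len(s)//5 is Nat division: len(s) ≥ 0)
def pvGlyphFlatTab (u : Char) : List Char × Nat :=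
  match pvFont? u with
  | none => ("?????????????????????????".toList, 5)   -- "?????" * 5
  | some s => (s, s.length / 5)

def pvGlyphFlat (c : Char) : List Char × Nat := pvGlyphFlatTab (PySem.Chars.upperChar c)

def generate_box_banner_alt (title : String) (tagline : String) : String :=
  let flats := title.toList.map pvGlyphFlat
  let max_width := (flats.map (fun p => p.2 + 1)).sum
  let box_width := Nat.max max_width tagline.toList.length + 4
  let inner := box_width - 2
  let blank : List Char := '║' :: (List.replicate box_width ' ' ++ ['║'])
  let rows : List (List Char) :=
    ['╔' :: (List.replicate box_width '═' ++ ['╗']), blank]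
    ++ (List.range 5).map (fun i =>
        let text := PySem.Chars.join []
          (flats.map (fun p =>
            PySem.List.slice p.1 (some ((i * p.2 : Nat) : Int)) (some (((i + 1) * p.2 : Nat) : Int)) ++ [' ']))
        "║  ".toList ++ (text ++ List.replicate (inner - text.length) ' ') ++ ['║'])
    ++ [blank, blank, '╚' :: (List.replicate box_width '═' ++ ['╝'])]
  String.ofList ("<pre>\n".toList ++ PySem.Chars.join ['\n'] rows ++ "\n</pre>".toList)

-- ===== PRECONDITION & SPEC =====
def Spec_generate_box_banner (title : String) (tagline : String) (out : String) : Prop := out = generate_box_banner_alt title tagline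
instance (title : String) (tagline : String) (out : String) : Decidable (Spec_generate_box_banner title tagline out) := by unfold Spec_generate_box_banner; infer_instance

-- ===== CLAIM (what is proved, stated in full; the proofs are below) =====
def Claim_equal_generate_box_banner : Prop := ∀ (title : String) (tagline : String), Dom_generate_box_banner title tagline → Spec_generate_box_banner title tagline (generate_box_banner title tagline)

-- ===== LEMMAS AND PROOFS =====

-- row i of the banner text for the character list cs (A's accumulated line i)
def pvRow (i : Int) (cs : List Char) : List Char :=
  PySem.Chars.join [] (cs.map (fun c => PySem.List.pyGetD (pvGlyph c) i [] ++ [' ']))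

theorem pvJoin_nil_cons (x : List Char) (r : List (List Char)) :
    PySem.Chars.join [] (x :: r) = x ++ PySem.Chars.join [] r := by
  simp [PySem.Chars.join]
  induction r with
  | nil => simp [List.intercalate]
  | cons y r ih => simp [List.intercalate, List.intersperse] at *

theorem pvRow_nil (i : Int) : pvRow i [] = [] := by
  simp [pvRow, PySem.Chars.join, List.intercalate]

theorem pvRow_cons (i : Int) (c : Char) (cs : List Char) :
    pvRow i (c :: cs) = (PySem.List.pyGetD (pvGlyph c) i [] ++ [' ']) ++ pvRow i cs := by
  simp [pvRow, pvJoin_nil_cons]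

theorem pvRange5 : PySem.List.pyRange 0 5 1 = [0, 1, 2, 3, 4] := by decide

theorem pvGet5 (l0 l1 l2 l3 l4 : List Char) :
    PySem.List.pyGetD [l0, l1, l2, l3, l4] (0 : Int) [] = l0 ∧
    PySem.List.pyGetD [l0, l1, l2, l3, l4] (1 : Int) [] = l1 ∧
    PySem.List.pyGetD [l0, l1, l2, l3, l4] (2 : Int) [] = l2 ∧
    PySem.List.pyGetD [l0, l1, l2, l3, l4] (3 : Int) [] = l3 ∧
    PySem.List.pyGetD [l0, l1, l2, l3, l4] (4 : Int) [] = l4 := by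
  refine ⟨?_, ?_, ?_, ?_, ?_⟩ <;> (rw [PySem.List.pyGetD_eq_getElem] <;> simp)

theorem pvSet5 (l0 l1 l2 l3 l4 v : List Char) :
    PySem.List.pySetD [l0, l1, l2, l3, l4] (0 : Int) v = [v, l1, l2, l3, l4] ∧
    PySem.List.pySetD [l0, l1, l2, l3, l4] (1 : Int) v = [l0, v, l2, l3, l4] ∧
    PySem.List.pySetD [l0, l1, l2, l3, l4] (2 : Int) v = [l0, l1, v, l3, l4] ∧
    PySem.List.pySetD [l0, l1, l2, l3, l4] (3 : Int) v = [l0, l1, l2, v, l4] ∧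
    PySem.List.pySetD [l0, l1, l2, l3, l4] (4 : Int) v = [l0, l1, l2, l3, v] := by
  refine ⟨?_, ?_, ?_, ?_, ?_⟩ <;> (rw [PySem.List.pySetD_of_nonneg] <;> simp [List.set])

theorem pvStepA_eq (l0 l1 l2 l3 l4 : List Char) (c : Char) :
    pvStepA [l0, l1, l2, l3, l4] c =
      [l0 ++ (PySem.List.pyGetD (pvGlyph c) 0 [] ++ [' ']),
       l1 ++ (PySem.List.pyGetD (pvGlyph c) 1 [] ++ [' ']),
       l2 ++ (PySem.List.pyGetD (pvGlyph c) 2 [] ++ [' ']),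
       l3 ++ (PySem.List.pyGetD (pvGlyph c) 3 [] ++ [' ']),
       l4 ++ (PySem.List.pyGetD (pvGlyph c) 4 [] ++ [' '])] := by
  unfold pvStepA
  rw [pvRange5]
  simp only [List.foldl]
  simp only [(pvGet5 _ _ _ _ _).1, (pvGet5 _ _ _ _ _).2.1, (pvGet5 _ _ _ _ _).2.2.1,
    (pvGet5 _ _ _ _ _).2.2.2.1, (pvGet5 _ _ _ _ _).2.2.2.2,
    (pvSet5 _ _ _ _ _ _).1, (pvSet5 _ _ _ _ _ _).2.1, (pvSet5 _ _ _ _ _ _).2.2.1,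
    (pvSet5 _ _ _ _ _ _).2.2.2.1, (pvSet5 _ _ _ _ _ _).2.2.2.2]

-- invariant of A's character loop: each of the five accumulators grows by its row
theorem pvFoldA (cs : List Char) (l0 l1 l2 l3 l4 : List Char) :
    cs.foldl pvStepA [l0, l1, l2, l3, l4] =
      [l0 ++ pvRow 0 cs, l1 ++ pvRow 1 cs, l2 ++ pvRow 2 cs, l3 ++ pvRow 3 cs, l4 ++ pvRow 4 cs] := by
  induction cs generalizing l0 l1 l2 l3 l4 with
  | nil => simp [pvRow_nil]
  | cons c cs ih =>
    simp only [List.foldl_cons, pvStepA_eq, ih, pvRow_cons, List.append_assoc]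

-- the flat glyph's five slices are exactly the table's five rows, and every row has the flat width
theorem pvTab_props (u : Char) :
    (pvGlyphTab u).map List.length = List.replicate 5 (pvGlyphFlatTab u).2
    ∧ ((List.range 5).map (fun i =>
        PySem.List.slice (pvGlyphFlatTab u).1
          (some ((i * (pvGlyphFlatTab u).2 : Nat) : Int))
          (some (((i + 1) * (pvGlyphFlatTab u).2 : Nat) : Int))) = pvGlyphTab u) := by
  unfold pvGlyphFlatTab pvFont? pvGlyphTab
  split <;> decide

-- a slice of the flat glyph is the corresponding table row, for i < 5
theorem pvSlice_eq_row (c : Char) (i : Nat) (h : i < 5) :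
    PySem.List.slice (pvGlyphFlat c).1
        (some ((i * (pvGlyphFlat c).2 : Nat) : Int))
        (some (((i + 1) * (pvGlyphFlat c).2 : Nat) : Int))
      = PySem.List.pyGetD (pvGlyph c) (i : Int) [] := by
  have h1 := (pvTab_props (PySem.Chars.upperChar c)).2
  unfold pvGlyph pvGlyphFlat
  rw [← h1]
  rw [PySem.List.pyGetD_natCast]
  rw [List.getD_eq_getElem _ _ (by simpa using h)]
  simp

-- every table row has the flat width
theorem pvRow_len (c : Char) (i : Nat) (h : i < 5) :
    (PySem.List.pyGetD (pvGlyph c) (i : Int) []).length = (pvGlyphFlat c).2 := by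
  have h2 := (pvTab_props (PySem.Chars.upperChar c)).1
  have hlen : (pvGlyphTab (PySem.Chars.upperChar c)).length = 5 := by
    have := congrArg List.length h2; simpa using this
  unfold pvGlyph pvGlyphFlat
  rw [PySem.List.pyGetD_natCast, List.getD_eq_getElem _ _ (by omega)]
  have h3 : ((pvGlyphTab (PySem.Chars.upperChar c)).map List.length)[i]'(by simp [hlen, h])
      = (pvGlyphFlatTab (PySem.Chars.upperChar c)).2 := by
    simp only [h2]; interval_cases i <;> rfl
  simpa using h3

-- length of row i: each character contributes its width + 1 (the separating space)
theorem pvRow_length (cs : List Char) (i : Nat) (h : i < 5) :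
    (pvRow (i : Int) cs).length = ((cs.map pvGlyphFlat).map (fun p => p.2 + 1)).sum := by
  induction cs with
  | nil => simp [pvRow_nil]
  | cons c cs ih =>
    rw [pvRow_cons]
    simp only [List.length_append, List.length_cons, List.length_nil, List.map_cons,
      List.sum_cons, ih]
    have := pvRow_len c i h
    omega

-- B's text for row i equals A's accumulated line i
theorem pvText_eq_row (cs : List Char) (i : Nat) (h : i < 5) :
    PySem.Chars.join []
        ((cs.map pvGlyphFlat).map (fun p =>
          PySem.List.slice p.1 (some ((i * p.2 : Nat) : Int)) (some (((i + 1) * p.2 : Nat) : Int)) ++ [' ']))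
      = pvRow (i : Int) cs := by
  unfold pvRow
  congr 1
  rw [List.map_map]
  apply List.map_congr_left
  intro c _
  simp only [Function.comp]
  rw [pvSlice_eq_row c i h]

theorem pvMax5 (L : Nat) : (List.max? [L, L, L, L, L]).getD 0 = L := by
  simp [List.max?]

-- ===== VERDICT (by name: the statement is the Claim_ definition above) =====
theorem generate_box_banner_spec : Claim_equal_generate_box_banner := by
  intro title tagline _
  unfold Spec_generate_box_banner generate_box_banner generate_box_banner_alt
  have hlines : title.toList.foldl pvStepA (List.replicate 5 ([] : List Char))
      = [pvRow 0 title.toList, pvRow 1 title.toList, pvRow 2 title.toList,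
         pvRow 3 title.toList, pvRow 4 title.toList] := by
    show title.toList.foldl pvStepA [[], [], [], [], []] = _
    rw [pvFoldA]; simp
  rw [hlines]
  have hL : ∀ i : Nat, i < 5 → (pvRow (i : Int) title.toList).length
      = ((title.toList.map pvGlyphFlat).map (fun p => p.2 + 1)).sum :=
    fun i h => pvRow_length title.toList i h
  have hmax : (([pvRow 0 title.toList, pvRow 1 title.toList, pvRow 2 title.toList,
        pvRow 3 title.toList, pvRow 4 title.toList].map (fun l => l.length)).max?).getD 0
      = ((title.toList.map pvGlyphFlat).map (fun p => p.2 + 1)).sum := by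
    have h0 := hL 0 (by omega); have h1 := hL 1 (by omega); have h2 := hL 2 (by omega)
    have h3 := hL 3 (by omega); have h4 := hL 4 (by omega)
    simp only [List.map]
    norm_num at h0 h1 h2 h3 h4
    rw [h0, h1, h2, h3, h4, pvMax5]
    simp [List.map_map]
  simp only [hmax]
  have htext : ∀ i : Nat, i < 5 → PySem.Chars.join []
        ((title.toList.map pvGlyphFlat).map (fun p =>
          PySem.List.slice p.1 (some ((i * p.2 : Nat) : Int)) (some (((i + 1) * p.2 : Nat) : Int)) ++ [' ']))
      = pvRow (i : Int) title.toList := fun i h => pvText_eq_row title.toList i h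
  simp only [List.range_succ, List.range_zero, List.map_nil, List.map_cons,
    List.nil_append, List.cons_append]
  rw [htext 0 (by omega), htext 1 (by omega), htext 2 (by omega), htext 3 (by omega),
    htext 4 (by omega)]
  simp only [Nat.cast_zero, Nat.cast_one, Nat.cast_ofNat]
  have g0 := hL 0 (by omega); have g1 := hL 1 (by omega); have g2 := hL 2 (by omega)
  have g3 := hL 3 (by omega); have g4 := hL 4 (by omega)
  norm_num at g0 g1 g2 g3 g4
  simp only [pvLjust, g0, g1, g2, g3, g4, List.map_map]
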